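-- pv_equiv track=rewrite | github.com/cafaray/atco.de-fights | maxSumSegments.py | maxSumSegments
-- ===== SOURCE A (Python) =====
-- def maxSumSegments(a):
--
--     res = [0 for i in range(len(a))]
--     for i in range(1,len(a)+1):
--         s=0
--         mx=0
--         index=-1
--         for j in range(len(a)):
--             s+=a[j]
--             if j>=i:
--                 s-=a[j-i]
--             if j>=i-1 and( index==-1 or s>mx):
--                 mx=s
--                 index=j-i+1
--         res[i-1]=index
--     return res
-- ===== SOURCE B (Python) =====
-- def maxSumSegments(a):
--     n = len(a)
--     P = [0]
--     acc = 0
--     for x in a: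
--         acc += x
--         P.append(acc)
--     res = []
--     for i in range(1, n + 1):
--         best = 0
--         idx = -1
--         for start in range(n - i + 1):
--             w = P[start + i] - P[start]
--             if idx == -1 or w > best:
--                 best = w
--                 idx = start
--         res.append(idx)
--     return res
-- ===== Notes on version B (the rewrite author's own statement) =====
-- stated objective: alternative
-- what changed: A maintains each window sum incrementally with a sliding window (add a[j], subtract a[j-i]); B builds a prefix-sum table once and computes every window sum as P[start+i]-P[start] in a direct loop over start positions.
import Mathlib
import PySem

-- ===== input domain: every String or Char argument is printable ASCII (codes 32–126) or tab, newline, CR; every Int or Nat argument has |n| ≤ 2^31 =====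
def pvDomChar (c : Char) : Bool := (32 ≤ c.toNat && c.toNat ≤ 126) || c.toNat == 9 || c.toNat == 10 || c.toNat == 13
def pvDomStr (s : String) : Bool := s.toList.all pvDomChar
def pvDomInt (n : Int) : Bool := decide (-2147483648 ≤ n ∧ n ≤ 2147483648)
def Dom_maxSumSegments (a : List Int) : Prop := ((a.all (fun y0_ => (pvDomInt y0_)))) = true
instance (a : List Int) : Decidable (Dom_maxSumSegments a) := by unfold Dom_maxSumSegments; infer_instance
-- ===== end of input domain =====

-- B replaces A's sliding-window sum maintenance by a prefix-sum table and a direct loop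
-- over window start positions (alternative decomposition, same O(n^2) cost).

-- ===== PORT A =====
-- A's inner sliding-window loop over j, state (s, mx, index)
def pvStepA (a : List Int) (i : Int) (st : Int × Int × Int) (j : Int) : Int × Int × Int :=
  let s := st.1 + PySem.List.pyGetD a j 0            -- a[j]: 0 ≤ j < len(a), in range
  let s := if i ≤ j then s - PySem.List.pyGetD a (j - i) 0 else s   -- a[j-i]: in range when i ≤ j
  if i - 1 ≤ j ∧ (st.2.2 = -1 ∨ st.2.1 < s) then (s, s, j - i + 1) else (s, st.2.1, st.2.2)

def pvInnerA (a : List Int) (i : Int) : Int × Int × Int :=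
  (PySem.List.pyRange 0 (a.length : Int) 1).foldl (pvStepA a i) (0, 0, -1)

def maxSumSegments (a : List Int) : List Int :=
  (PySem.List.pyRange 1 ((a.length : Int) + 1) 1).foldl
    (fun res i => res.set (i - 1).toNat (pvInnerA a i).2.2)   -- res[i-1] = index; 1 ≤ i ≤ len(a)
    (List.replicate a.length (0 : Int))

-- ===== PORT B =====
-- P = [0]; acc = 0; for x in a: acc += x; P.append(acc)
def pvPrefix (a : List Int) : List Int :=
  (a.foldl (fun (st : List Int × Int) x => (st.1 ++ [st.2 + x], st.2 + x)) ([0], 0)).1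

-- B's inner loop over start, state (best, idx)
def pvStepB (P : List Int) (i : Int) (bi : Int × Int) (start : Int) : Int × Int :=
  let w := PySem.List.pyGetD P (start + i) 0 - PySem.List.pyGetD P start 0   -- P[start+i], P[start]: in range
  if bi.2 = -1 ∨ bi.1 < w then (w, start) else bi

def pvInnerB (P : List Int) (n i : Int) : Int × Int :=
  (PySem.List.pyRange 0 (n - i + 1) 1).foldl (pvStepB P i) (0, -1)

def maxSumSegments_alt (a : List Int) : List Int :=
  let P := pvPrefix a
  (PySem.List.pyRange 1 ((a.length : Int) + 1) 1).foldl
    (fun res i => res ++ [(pvInnerB P (a.length : Int) i).2]) []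

-- ===== PRECONDITION & SPEC =====
def Spec_maxSumSegments (a : List Int) (out : List Int) : Prop := out = maxSumSegments_alt a
instance (a : List Int) (out : List Int) : Decidable (Spec_maxSumSegments a out) := by unfold Spec_maxSumSegments; infer_instance

-- ===== CLAIM (what is proved, stated in full; the proofs are below) =====
def Claim_equal_maxSumSegments : Prop := ∀ (a : List Int), Dom_maxSumSegments a → Spec_maxSumSegments a (maxSumSegments a)

-- ===== LEMMAS AND PROOFS =====

-- prefix sum of the first k elements
def pvPre (a : List Int) (k : Nat) : Int := ((a.take k).sum)

-- the common mathematical inner step, over Nat start positions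
def pvStepF (a : List Int) (i : Nat) (bi : Int × Int) (t : Nat) : Int × Int :=
  if bi.2 = -1 ∨ bi.1 < pvPre a (t + i) - pvPre a t then (pvPre a (t + i) - pvPre a t, (t : Int)) else bi

theorem pvPrefix_fold (a : List Int) : ∀ (p : List Int) (acc : Int),
    a.foldl (fun (st : List Int × Int) x => (st.1 ++ [st.2 + x], st.2 + x)) (p, acc)
      = (p ++ (List.range a.length).map (fun k => acc + (a.take (k + 1)).sum), acc + a.sum) := by
  induction a with
  | nil => simp
  | cons x t ih =>
    intro p acc
    simp only [List.foldl_cons, ih, List.length_cons, List.range_succ_eq_map, List.map_cons,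
      List.map_map, List.take_succ_cons, List.sum_cons, List.sum_nil, List.take_zero]
    simp only [Prod.mk.injEq]
    refine ⟨?_, by ring⟩
    rw [List.append_assoc, List.singleton_append]
    congr 2
    · ring
    · congr 1
      funext k
      simp only [Function.comp_apply, Nat.succ_eq_add_one]
      ring

theorem pvPrefix_eq (a : List Int) :
    pvPrefix a = (List.range (a.length + 1)).map (pvPre a) := by
  unfold pvPrefix
  rw [pvPrefix_fold a [0] 0]
  simp only [List.range_succ_eq_map, List.map_cons, List.map_map]
  simp [pvPre, Function.comp, Nat.succ_eq_add_one]

theorem pvP_get (a : List Int) (m : Nat) (hm : m ≤ a.length) :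
    PySem.List.pyGetD (pvPrefix a) ((m : Nat) : Int) 0 = pvPre a m := by
  rw [PySem.List.pyGetD_natCast, pvPrefix_eq, PySem.List.getD_map_range _ _ _ _ (by omega)]

theorem pvPre_succ (a : List Int) (k : Nat) (hk : k < a.length) :
    pvPre a (k + 1) = pvPre a k + a.getD k 0 := by
  unfold pvPre
  rw [List.sum_take_succ a k hk, List.getD_eq_getElem a 0 hk]

-- the core correspondence: A's sliding-window fold equals (current window sum, the common fold)
theorem pvCore (a : List Int) (i : Nat) (hi1 : 1 ≤ i) :
    ∀ (m : Nat), m ≤ a.length →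
      (List.range m).foldl (fun st (jn : Nat) => pvStepA a (i : Int) st ((jn : Nat) : Int)) (0, 0, -1)
        = (pvPre a m - pvPre a (m - i),
           ((List.range (m + 1 - i)).foldl (pvStepF a i) (0, -1)).1,
           ((List.range (m + 1 - i)).foldl (pvStepF a i) (0, -1)).2) := by
  intro m
  induction m with
  | zero =>
    intro _
    have h0 : 0 + 1 - i = 0 := by omega
    simp [h0, pvPre]
  | succ m ih =>
    intro hm
    have hmn : m < a.length := by omega
    rw [List.range_succ, List.foldl_append, ih (by omega)]
    simp only [List.foldl_cons]
    -- compute one step of A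
    have hget : PySem.List.pyGetD a ((m : Nat) : Int) 0 = a.getD m 0 :=
      PySem.List.pyGetD_natCast a m 0
    unfold pvStepA
    by_cases hcase : i ≤ m
    · -- subtraction branch fires
      have hle : (i : Int) ≤ (m : Int) := by exact_mod_cast hcase
      have hgets : PySem.List.pyGetD a ((m : Int) - (i : Int)) 0 = a.getD (m - i) 0 := by
        have : ((m : Int) - (i : Int)) = ((m - i : Nat) : Int) := by omega
        rw [this, PySem.List.pyGetD_natCast]
      have hs2 : pvPre a m - pvPre a (m - i) + PySem.List.pyGetD a ((m : Nat) : Int) 0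
            - PySem.List.pyGetD a ((m : Int) - (i : Int)) 0
          = pvPre a (m + 1) - pvPre a (m + 1 - i) := by
        rw [hget, hgets, pvPre_succ a m hmn]
        have h1 : m + 1 - i = (m - i) + 1 := by omega
        rw [h1, pvPre_succ a (m - i) (by omega)]
        ring
      have hcond : ((i : Int) - 1 ≤ (m : Int)) = True := by simp; omega
      simp only [if_pos hle, hcond, true_and, hs2]
      -- now match with one step of pvStepF at t = m + 1 - i
      have hrange : m + 1 + 1 - i = (m + 1 - i) + 1 := by omega
      rw [hrange, List.range_succ, List.foldl_append, List.foldl_cons, List.foldl_nil]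
      unfold pvStepF
      have hw : pvPre a (m + 1 - i + i) - pvPre a (m + 1 - i) = pvPre a (m + 1) - pvPre a (m + 1 - i) := by
        congr 2
        omega
      have hidx : (m : Int) - (i : Int) + 1 = ((m + 1 - i : Nat) : Int) := by omega
      rw [hw, hidx]
      split_ifs <;> simp
    · -- no subtraction; may or may not be a full window yet
      have hnle : ¬ ((i : Int) ≤ (m : Int)) := by exact_mod_cast hcase
      have hmi : m - i = 0 := by omega
      have hs1 : pvPre a m - pvPre a (m - i) + PySem.List.pyGetD a ((m : Nat) : Int) 0
          = pvPre a (m + 1) := by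
        rw [hget, pvPre_succ a m hmn, hmi]
        simp [pvPre]
      simp only [if_neg hnle, hs1]
      by_cases hfull : i ≤ m + 1
      · -- m + 1 = i exactly (since ¬ i ≤ m): first full window
        have hieq : i = m + 1 := by omega
        have hcond : ((i : Int) - 1 ≤ (m : Int)) = True := by simp; omega
        have h0 : m + 1 - i = 0 := by omega
        have hrange : m + 1 + 1 - i = 1 := by omega
        simp only [hcond, true_and, h0, hrange]
        simp only [List.range_one, List.foldl_cons, List.range_zero]
        unfold pvStepF
        have hw : pvPre a (0 + i) - pvPre a 0 = pvPre a (m + 1) := by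
          simp [pvPre, hieq]
        have hidx : (m : Int) - (i : Int) + 1 = ((0 : Nat) : Int) := by omega
        rw [hw, hidx]
        simp only [List.foldl_nil]
        split_ifs <;> simp [pvPre]
      · -- window not yet full: no update on either side
        have hcond : ¬ ((i : Int) - 1 ≤ (m : Int)) := by omega
        have h0 : m + 1 - i = 0 := by omega
        have h1 : m + 1 + 1 - i = 0 := by omega
        simp [hcond, h0, h1, pvPre]

-- the per-window result both programs compute, over Nat window end-count
def pvG (a : List Int) (k : Nat) : Int :=
  ((List.range (a.length - k)).foldl (pvStepF a (k + 1)) (0, -1)).2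

theorem pvSetMap (g : Nat → Int) (n : Nat) :
    (List.range n).foldl (fun r k => r.set k (g k)) (List.replicate n (0 : Int))
      = (List.range n).map g := by
  suffices h : ∀ m, m ≤ n →
      (List.range m).foldl (fun r k => r.set k (g k)) (List.replicate n (0 : Int))
        = (List.range m).map g ++ List.replicate (n - m) (0 : Int) by
    have := h n (le_refl n)
    simpa using this
  intro m
  induction m with
  | zero => simp
  | succ m ih =>
    intro hm
    rw [List.range_succ, List.foldl_append, ih (by omega), List.foldl_cons, List.foldl_nil]
    rw [List.set_append]
    have hlen : ((List.range m).map g).length = m := by simp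
    have hrep : n - m = (n - (m + 1)) + 1 := by omega
    rw [if_neg (by omega), hlen, Nat.sub_self, hrep]
    simp [List.map_append, List.replicate_succ]

theorem pvA_eq_map (a : List Int) :
    maxSumSegments a = (List.range a.length).map (pvG a) := by
  unfold maxSumSegments
  rw [PySem.List.pyRange_one]
  have hb : (((a.length : Int) + 1) - 1).toNat = a.length := by omega
  rw [hb, List.foldl_map]
  have hstep : ∀ (res : List Int), ∀ k ∈ List.range a.length,
      (fun res (i : Int) => res.set (i - 1).toNat (pvInnerA a i).2.2) res (1 + (k : Int))
        = (fun res k => res.set k (pvG a k)) res k := by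
    intro res k hk
    have hk' : k < a.length := List.mem_range.mp hk
    simp only
    congr 1
    · omega
    · -- (pvInnerA a (1 + k)).2.2 = pvG a k
      have hcast : (1 : Int) + (k : Int) = ((k + 1 : Nat) : Int) := by omega
      unfold pvInnerA
      rw [hcast, PySem.List.pyRange_one]
      have hn : (((a.length : Int)) - 0).toNat = a.length := by omega
      rw [hn, List.foldl_map]
      have hz : ∀ (st : Int × Int × Int), ∀ jn ∈ List.range a.length,
          pvStepA a ((k + 1 : Nat) : Int) st ((0 : Int) + (jn : Int))
            = pvStepA a ((k + 1 : Nat) : Int) st ((jn : Nat) : Int) := by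
        intro st jn _
        norm_num
      rw [PySem.List.foldl_congr_mem _ _ _ _ hz]
      rw [pvCore a (k + 1) (by omega) a.length (le_refl _)]
      unfold pvG
      have : a.length + 1 - (k + 1) = a.length - k := by omega
      rw [this]
  rw [PySem.List.foldl_congr_mem _ _ _ _ hstep]
  exact pvSetMap (pvG a) a.length

theorem pvB_eq_map (a : List Int) :
    maxSumSegments_alt a = (List.range a.length).map (pvG a) := by
  unfold maxSumSegments_alt
  rw [PySem.List.pyRange_one]
  have hb : (((a.length : Int) + 1) - 1).toNat = a.length := by omega
  rw [hb, List.foldl_map]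
  have hstep : ∀ (res : List Int), ∀ k ∈ List.range a.length,
      (fun res (i : Int) => res ++ [(pvInnerB (pvPrefix a) (a.length : Int) i).2]) res (1 + (k : Int))
        = (fun res k => res ++ [pvG a k]) res k := by
    intro res k hk
    have hk' : k < a.length := List.mem_range.mp hk
    simp only [List.append_cancel_left_eq, List.cons.injEq, and_true]
    -- (pvInnerB P n (1+k)).2 = pvG a k
    unfold pvInnerB
    have hbnd : ((a.length : Int) - (1 + (k : Int)) + 1) = ((a.length - k : Nat) : Int) := by omega
    rw [hbnd, PySem.List.pyRange_one]
    have hn : (((a.length - k : Nat) : Int) - 0).toNat = a.length - k := by omega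
    rw [hn, List.foldl_map]
    have hz : ∀ (bi : Int × Int), ∀ t ∈ List.range (a.length - k),
        pvStepB (pvPrefix a) (1 + (k : Int)) bi ((0 : Int) + (t : Int))
          = pvStepF a (k + 1) bi t := by
      intro bi t ht
      have ht' : t < a.length - k := List.mem_range.mp ht
      unfold pvStepB pvStepF
      have h1 : (0 : Int) + (t : Int) + (1 + (k : Int)) = ((t + (k + 1) : Nat) : Int) := by
        push_cast; ring
      have h2 : (0 : Int) + (t : Int) = ((t : Nat) : Int) := by omega
      rw [h1, h2, pvP_get a (t + (k + 1)) (by omega), pvP_get a t (by omega)]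
    rw [PySem.List.foldl_congr_mem _ _ _ _ hz]
    rfl
  rw [PySem.List.foldl_congr_mem _ _ _ _ hstep]
  rw [PySem.List.foldl_append_singleton_eq_map (pvG a)]
  simp

-- ===== VERDICT (by name: the statement is the Claim_ definition above) =====
theorem maxSumSegments_spec : Claim_equal_maxSumSegments := by
  intro a _
  unfold Spec_maxSumSegments
  rw [pvA_eq_map, pvB_eq_map]
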